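-- pv_equiv track=rewrite | github.com/aakashuppadhaya/rosalind | rabit.py | rabbit_count
-- ===== SOURCE A (Python) =====
-- def rabbit_count(w,n):
-- 				if(w==0):
-- 					return 0
-- 				if(w==1):
-- 					return 1
-- 				if(w==2):
-- 					return n
-- 				g1=rabbit_count(w-1,n)
-- 				g2=rabbit_count(w-2,n)
-- 				if(w<=40):
-- 					return g1+g2
-- ===== SOURCE B (Python) =====
-- def rabbit_count(w, n):
--     # bottom-up iterative DP instead of exponential naive recursion;
--     # A returns None for w > 40 (falls off without a return), preserved here
--     if w > 40:
--         return None
--     if w == 0: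
--         return 0
--     if w == 1:
--         return 1
--     prev, cur = 1, n
--     for _ in range(3, w + 1):
--         prev, cur = cur, prev + cur
--     return cur
-- ===== Notes on version B (the rewrite author's own statement) =====
-- stated objective: faster
-- what changed: Replaced the naive exponential double recursion with a bottom-up iterative DP using two rolling variables, preserving the None result for w > 40; Pre_ excludes w < 0, where A recurses without a base case and raises RecursionError.
-- outside the precondition, e.g. on rabbit_count(-1, 3): A raises RecursionError, B returns 3
import Mathlib
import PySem

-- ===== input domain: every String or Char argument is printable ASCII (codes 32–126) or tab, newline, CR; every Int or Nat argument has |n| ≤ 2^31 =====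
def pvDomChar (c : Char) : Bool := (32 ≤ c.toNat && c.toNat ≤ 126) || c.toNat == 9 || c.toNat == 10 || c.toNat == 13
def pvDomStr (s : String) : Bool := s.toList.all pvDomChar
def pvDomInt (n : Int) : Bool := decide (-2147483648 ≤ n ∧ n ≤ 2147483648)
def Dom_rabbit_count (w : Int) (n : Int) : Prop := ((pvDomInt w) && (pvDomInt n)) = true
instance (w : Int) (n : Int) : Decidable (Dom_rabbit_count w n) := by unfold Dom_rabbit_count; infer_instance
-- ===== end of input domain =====

-- B replaces A's naive exponential double recursion by a bottom-up iterative DP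
-- (two rolling variables over range(3, w+1)), preserving the None result for w > 40.

-- ===== PORT A =====
-- A's recursion decreases w by 1 and 2; for w < 0 it never terminates (Python: RecursionError),
-- so the port recurses on w.toNat and Pre_ excludes w < 0.
def rabbitA (n : Int) : Nat → Option Int
  | 0 => some 0
  | 1 => some 1
  | 2 => some n
  | (k+3) =>
      let g1 := rabbitA n (k+2)
      let g2 := rabbitA n (k+1)
      if ((k : Int) + 3) ≤ 40 then
        -- g1 + g2 (both are always `some` when w ≤ 40)
        match g1, g2 with
        | some a, some b => some (a + b)
        | _, _ => none
      else none   -- Python falls off the function end: returns None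

def rabbit_count (w : Int) (n : Int) : Option Int :=
  if w < 0 then none else rabbitA n w.toNat

-- ===== PORT B =====
def rabbit_count_alt (w : Int) (n : Int) : Option Int :=
  if w > 40 then none
  else if w = 0 then some 0
  else if w = 1 then some 1
  else
    let pc := (PySem.List.pyRange 3 (w + 1) 1).foldl
      (fun (pc : Int × Int) _ => (pc.2, pc.1 + pc.2)) (1, n)
    some pc.2

-- ===== PRECONDITION & SPEC =====
-- Pre_ excludes w < 0, where Python A recurses without a base case and raises RecursionError.
def Pre_rabbit_count (w : Int) (n : Int) : Prop := 0 ≤ w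
instance (w : Int) (n : Int) : Decidable (Pre_rabbit_count w n) := by unfold Pre_rabbit_count; infer_instance
def pvWitness_rabbit_count : Int × Int := (7, 3)

def Spec_rabbit_count (w : Int) (n : Int) (out : Option Int) : Prop := out = rabbit_count_alt w n
instance (w : Int) (n : Int) (out : Option Int) : Decidable (Spec_rabbit_count w n out) := by unfold Spec_rabbit_count; infer_instance

-- ===== CLAIM (what is proved, stated in full; the proofs are below) =====
def Claim_equal_rabbit_count : Prop := ∀ (w : Int) (n : Int), Dom_rabbit_count w n → Pre_rabbit_count w n → Spec_rabbit_count w n (rabbit_count w n)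

-- ===== LEMMAS AND PROOFS =====

-- the mathematical recurrence both programs compute for w ≤ 40
def fib2 (n : Int) : Nat → Int
  | 0 => 0
  | 1 => 1
  | 2 => n
  | (k+3) => fib2 n (k+2) + fib2 n (k+1)

theorem rabbitA_le (n : Int) : ∀ k : Nat, k ≤ 40 → rabbitA n k = some (fib2 n k) := by
  intro k
  induction k using Nat.strong_induction_on with
  | _ k ih =>
    match k with
    | 0 => intro _; simp [rabbitA, fib2]
    | 1 => intro _; simp [rabbitA, fib2]
    | 2 => intro _; simp [rabbitA, fib2]
    | (m+3) =>
      intro h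
      rw [rabbitA, ih (m+2) (by omega) (by omega), ih (m+1) (by omega) (by omega)]
      have hc : ((m : Int) + 3) ≤ 40 := by exact_mod_cast (by omega : (m:Int) + 3 ≤ 40)
      simp [hc, fib2]

theorem rabbitA_gt (n : Int) : ∀ k : Nat, 40 < k → rabbitA n k = none := by
  intro k hk
  match k, hk with
  | (m+3), hk =>
    rw [rabbitA]
    have hc : ¬ ((m : Int) + 3) ≤ 40 := by
      have : (40 : Int) < (m:Int) + 3 := by exact_mod_cast hk
      omega
    simp [hc]

theorem foldB (n : Int) : ∀ j : Nat,
    ((PySem.List.pyRange 3 ((j : Int) + 3) 1).foldl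
      (fun (pc : Int × Int) _ => (pc.2, pc.1 + pc.2)) (1, n))
    = (fib2 n (j+1), fib2 n (j+2)) := by
  intro j
  induction j with
  | zero =>
      rw [PySem.List.pyRange_one_eq_nil (by norm_num)]
      simp [fib2]
  | succ j ih =>
      have h3 : (3 : Int) ≤ (j : Int) + 3 := by omega
      have : ((j + 1 : Nat) : Int) + 3 = ((j : Int) + 3) + 1 := by push_cast; ring
      rw [this, PySem.List.pyRange_one_succ_right h3, List.foldl_append, ih]
      show (fib2 n (j+2), fib2 n (j+1) + fib2 n (j+2)) = _
      have : fib2 n (j+3) = fib2 n (j+2) + fib2 n (j+1) := rfl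
      simp [this]
      omega

-- ===== VERDICT (by name: the statement is the Claim_ definition above) =====
theorem rabbit_count_spec : Claim_equal_rabbit_count := by
  intro w n _ hpre
  unfold Spec_rabbit_count rabbit_count rabbit_count_alt Pre_rabbit_count at *
  rw [if_neg (by omega : ¬ w < 0)]
  by_cases h40 : w > 40
  · rw [if_pos h40, rabbitA_gt n w.toNat (by omega)]
  · rw [if_neg h40]
    by_cases h0 : w = 0
    · subst h0; simp [rabbitA_le n 0 (by omega), fib2]
    · rw [if_neg h0]
      by_cases h1 : w = 1
      · subst h1; simp [rabbitA_le n 1 (by omega), fib2]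
      · rw [if_neg h1]
        have h2 : 2 ≤ w := by omega
        obtain ⟨j, hj⟩ : ∃ j : Nat, w = (j : Int) + 2 := ⟨(w - 2).toNat, by omega⟩
        subst hj
        have htn : ((j : Int) + 2).toNat = j + 2 := by omega
        have hble : (j : Nat) + 2 ≤ 40 := by omega
        rw [htn, rabbitA_le n (j+2) hble]
        have harg : (j : Int) + 2 + 1 = (j : Int) + 3 := by ring
        rw [harg, foldB n j]
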